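-- pv_equiv track=rewrite | github.com/UUDigitalHumanitieslab/mwe-query | mwe_query/mwe_annotate.py | expandlemmas
-- ===== SOURCE A (Python) =====
-- from typing import Any, List, Optional, Tuple
--
-- altsym = '|'
--
-- def expandlemmas(lemmas: List[str]) -> List[List[str]]:
--     results = []
--     if lemmas == []:
--         return [[]]
--     head = lemmas[0]
--     tail = lemmas[1:]
--     altheads = head.split(altsym)
--     tailresults = expandlemmas(tail)
--     for althead in altheads:
--         for tailresult in tailresults:
--             result = [althead] + tailresult
--             results.append(result)
--     return results
-- ===== SOURCE B (Python) =====
-- def expandlemmas(lemmas):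
--     results = [[]]
--     for lem in lemmas:
--         alts = lem.split('|')
--         results = [r + [a] for r in results for a in alts]
--     return results
-- ===== Notes on version B (the rewrite author's own statement) =====
-- stated objective: idiomatic
-- what changed: Replaced recursion over the tail (prepending each alternative to every recursive tail result) with a single iterative left-to-right product loop that extends every accumulated prefix with each alternative of the current lemma.
import Mathlib
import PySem

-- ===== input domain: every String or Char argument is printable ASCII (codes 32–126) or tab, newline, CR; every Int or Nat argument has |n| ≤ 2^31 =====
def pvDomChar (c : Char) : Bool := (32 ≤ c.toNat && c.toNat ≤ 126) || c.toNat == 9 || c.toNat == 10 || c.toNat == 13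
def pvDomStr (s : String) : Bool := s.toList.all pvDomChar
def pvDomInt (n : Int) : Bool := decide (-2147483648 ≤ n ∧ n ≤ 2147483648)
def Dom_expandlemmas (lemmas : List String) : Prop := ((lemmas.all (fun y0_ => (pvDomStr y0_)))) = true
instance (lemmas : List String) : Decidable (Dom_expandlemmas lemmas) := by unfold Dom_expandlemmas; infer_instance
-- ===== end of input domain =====

-- B replaces A's recursion over the tail with an iterative left-to-right product loop (objective: simpler/idiomatic decomposition; return value only, no side effects involved).
-- ===== PORT A =====
-- altsym = '|'; head.split(altsym): sep is the literal nonempty "|", so PySem.Str.split? is always some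
def pySplitAlt (s : String) : List String := (PySem.Str.split? s "|").getD []

def expandlemmas : List String → List (List String)
  | [] => [[]]
  | head :: tail =>
    let altheads := pySplitAlt head
    let tailresults := expandlemmas tail
    altheads.foldl (fun results althead =>
      tailresults.foldl (fun results tailresult =>
        results ++ [althead :: tailresult]) results) []

-- ===== PORT B =====
def expandlemmas_alt (lemmas : List String) : List (List String) :=
  lemmas.foldl (fun results lem =>
    let alts := pySplitAlt lem
    results.flatMap (fun r => alts.map (fun a => r ++ [a]))) [[]]

-- ===== PRECONDITION & SPEC =====
def Spec_expandlemmas (lemmas : List String) (out : List (List String)) : Prop := out = expandlemmas_alt lemmas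
instance (lemmas : List String) (out : List (List String)) : Decidable (Spec_expandlemmas lemmas out) := by unfold Spec_expandlemmas; infer_instance

-- ===== CLAIM (what is proved, stated in full; the proofs are below) =====
def Claim_equal_expandlemmas : Prop := ∀ (lemmas : List String), Dom_expandlemmas lemmas → Spec_expandlemmas lemmas (expandlemmas lemmas)

-- ===== LEMMAS AND PROOFS =====

lemma flatten_map_singleton {α β : Type} (f : α → β) (l : List α) :
    (l.map (fun x => [f x])).flatten = l.map f := by
  induction l with | nil => simp | cons a l ih => simp [ih]

-- A's cons case, with the two nested append-loops read off as a flatMap of maps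
lemma expandlemmas_cons (h : String) (t : List String) :
    expandlemmas (h :: t)
      = (pySplitAlt h).flatMap (fun a => (expandlemmas t).map (a :: ·)) := by
  simp [expandlemmas, List.flatMap, flatten_map_singleton]

-- loop invariant of B's single pass: the accumulator is a list of prefixes, each of
-- which gets extended by every expansion of the remaining lemmas
lemma expandlemmas_alt_fold (t : List String) (acc : List (List String)) :
    t.foldl (fun results lem =>
      results.flatMap (fun r => (pySplitAlt lem).map (fun a => r ++ [a]))) acc
    = acc.flatMap (fun r => (expandlemmas t).map (r ++ ·)) := by
  induction t generalizing acc with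
  | nil => simp [expandlemmas]
  | cons h t ih =>
    rw [List.foldl_cons, ih, expandlemmas_cons]
    simp [List.flatMap_map, List.map_flatMap, List.map_map, Function.comp_def,
      List.flatMap_assoc]

-- ===== VERDICT (by name: the statement is the Claim_ definition above) =====
theorem expandlemmas_spec : Claim_equal_expandlemmas := by
  intro lemmas _
  unfold Spec_expandlemmas expandlemmas_alt
  rw [expandlemmas_alt_fold]
  simp
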